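-- pv_equiv track=rewrite | github.com/spailll/AFV | groundstation/MLNode2.py | process_coordinates
-- ===== SOURCE A (Python) =====
-- def process_coordinates(coordinates):
--     group_size = 10
--     x_groups = []
--     y_groups = []
--     for i in range(0, len(coordinates), group_size):
--         group = coordinates[i:i+group_size]
--         x_coords = [coord[0] for coord in group]
--         y_coords = [coord[1] for coord in group]
--         x_groups.append(x_coords)
--         y_groups.append(y_coords)
--     return x_groups, y_groups
-- ===== SOURCE B (Python) =====
-- def process_coordinates(coordinates):
--     xs = [c[0] for c in coordinates]
--     ys = [c[1] for c in coordinates]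
--
--     def chunk(lst):
--         if not lst:
--             return []
--         return [lst[:10]] + chunk(lst[10:])
--
--     return chunk(xs), chunk(ys)
-- ===== Notes on version B (the rewrite author's own statement) =====
-- stated objective: alternative
-- what changed: B splits the whole coordinate list into flat x/y lists first and then chunks each flat list recursively into groups of 10, reversing A's chunk-first-then-split nested loop structure.
import Mathlib
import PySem

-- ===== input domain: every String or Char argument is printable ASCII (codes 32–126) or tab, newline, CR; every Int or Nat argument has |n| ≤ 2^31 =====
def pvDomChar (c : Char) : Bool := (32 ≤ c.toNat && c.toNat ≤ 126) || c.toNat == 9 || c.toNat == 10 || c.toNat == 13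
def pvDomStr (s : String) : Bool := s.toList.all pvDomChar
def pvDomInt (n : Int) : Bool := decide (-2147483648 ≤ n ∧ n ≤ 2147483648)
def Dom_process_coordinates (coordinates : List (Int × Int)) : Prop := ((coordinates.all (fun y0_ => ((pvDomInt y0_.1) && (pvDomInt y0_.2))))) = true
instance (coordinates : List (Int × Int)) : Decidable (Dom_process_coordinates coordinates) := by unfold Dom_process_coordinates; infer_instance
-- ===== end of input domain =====

-- B regroups the work: first split all coordinates into flat x/y lists, then chunk each into
-- groups of 10 (A chunks first and splits each chunk); same values, different pass structure.

-- ===== PORT A =====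
def process_coordinates (coordinates : List (Int × Int)) : List (List Int) × List (List Int) :=
  let group_size : Int := 10
  (PySem.List.pyRange 0 (coordinates.length : Int) group_size).foldl
    (fun (acc : List (List Int) × List (List Int)) i =>
      let group := PySem.List.slice coordinates (some i) (some (i + group_size))
      let x_coords := group.map (fun coord => coord.1)
      let y_coords := group.map (fun coord => coord.2)
      (acc.1 ++ [x_coords], acc.2 ++ [y_coords]))
    ([], [])

-- ===== PORT B =====
-- lst[:10] / lst[10:] with literal nonnegative bounds are List.take 10 / List.drop 10
-- (PySem.List.slice_to_natCast / slice_from_natCast).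
def pvChunk10 (l : List Int) : List (List Int) :=
  if h : l = [] then [] else l.take 10 :: pvChunk10 (l.drop 10)
termination_by l.length
decreasing_by
  simp only [List.length_drop]
  exact Nat.sub_lt (List.length_pos_of_ne_nil h) (by norm_num)

def process_coordinates_alt (coordinates : List (Int × Int)) : List (List Int) × List (List Int) :=
  let xs := coordinates.map (fun c => c.1)
  let ys := coordinates.map (fun c => c.2)
  (pvChunk10 xs, pvChunk10 ys)

-- ===== PRECONDITION & SPEC =====
def Spec_process_coordinates (coordinates : List (Int × Int)) (out : List (List Int) × List (List Int)) : Prop := out = process_coordinates_alt coordinates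
instance (coordinates : List (Int × Int)) (out : List (List Int) × List (List Int)) : Decidable (Spec_process_coordinates coordinates out) := by unfold Spec_process_coordinates; infer_instance

-- ===== CLAIM (what is proved, stated in full; the proofs are below) =====
def Claim_equal_process_coordinates : Prop := ∀ (coordinates : List (Int × Int)), Dom_process_coordinates coordinates → Spec_process_coordinates coordinates (process_coordinates coordinates)

-- ===== LEMMAS AND PROOFS =====

theorem pvChunk10_nil : pvChunk10 [] = [] := by simp [pvChunk10]

theorem pvChunk10_cons (l : List Int) (h : l ≠ []) :
    pvChunk10 l = l.take 10 :: pvChunk10 (l.drop 10) := by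
  rw [pvChunk10]; simp [h]

-- range(0, n, 10) for n > 0 starts at 0 and the rest is range(0, n-10, 10) shifted by 10
theorem pyRange_ten_cons (n : Int) (h : 0 < n) :
    PySem.List.pyRange 0 n 10 = 0 :: (PySem.List.pyRange 0 (n - 10) 10).map (· + 10) := by
  rw [PySem.List.pyRange_of_pos 0 n (by norm_num),
      PySem.List.pyRange_of_pos 0 (n - 10) (by norm_num)]
  have hcnt : ((n - 0 + 10 - 1) / 10).toNat
      = (if 0 < n - 10 then ((n - 10 - 0 + 10 - 1) / 10).toNat else 0) + 1 := by
    split_ifs with h10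
    · have : (n + 9) / 10 = (n - 1) / 10 + 1 := by omega
      omega
    · have h1 : 1 ≤ (n + 9) / 10 := by omega
      have h2 : (n + 9) / 10 ≤ 1 := by omega
      omega
  simp only [if_pos h, hcnt, List.range_succ_eq_map, List.map_cons, List.map_map]
  norm_num [Function.comp]
  intro a _
  ring

theorem loopA (l : List (Int × Int)) (ax ay : List (List Int)) :
    (PySem.List.pyRange 0 (l.length : Int) 10).foldl
      (fun (acc : List (List Int) × List (List Int)) i =>
        (acc.1 ++ [(PySem.List.slice l (some i) (some (i + 10))).map (fun coord => coord.1)],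
         acc.2 ++ [(PySem.List.slice l (some i) (some (i + 10))).map (fun coord => coord.2)]))
      (ax, ay)
    = (ax ++ pvChunk10 (l.map (fun c => c.1)), ay ++ pvChunk10 (l.map (fun c => c.2))) := by
  induction hn : l.length using Nat.strong_induction_on generalizing l ax ay with
  | _ n ih =>
    subst hn
    rcases Decidable.em (l = []) with rfl | hne
    · simp only [List.length_nil, Nat.cast_zero]
      rw [show PySem.List.pyRange 0 0 10 = [] from rfl]
      simp [pvChunk10_nil]
    · have hpos : 0 < l.length := List.length_pos_of_ne_nil hne
      rw [pyRange_ten_cons _ (by exact_mod_cast hpos)]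
      rw [List.foldl_cons, List.foldl_map]
      rw [PySem.List.foldl_congr_mem _ _
        (fun (acc : List (List Int) × List (List Int)) i =>
          (acc.1 ++ [(PySem.List.slice (l.drop 10) (some i) (some (i + 10))).map (fun coord => coord.1)],
           acc.2 ++ [(PySem.List.slice (l.drop 10) (some i) (some (i + 10))).map (fun coord => coord.2)])) _
        (by
          intro acc i hi
          have h0i : 0 ≤ i := by
            have := (PySem.List.mem_pyRange_iff_of_pos (by norm_num : (0:Int) < 10) i).mp hi
            omega
          have hsl : PySem.List.slice l (some (i + 10)) (some (i + 10 + 10))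
              = PySem.List.slice (l.drop 10) (some i) (some (i + 10)) := by
            rw [PySem.List.slice_toNat l (by omega) (by omega),
                PySem.List.slice_toNat (l.drop 10) h0i (by omega)]
            rw [List.drop_drop]
            have e2 : 10 + (i).toNat = (i + 10).toNat := by omega
            rw [e2]
            congr 1
            omega
          rw [hsl])]
      have hr : PySem.List.pyRange 0 ((l.length : Int) - 10) 10
          = PySem.List.pyRange 0 (((l.drop 10).length : Int)) 10 := by
        by_cases h10 : 10 ≤ l.length
        · congr 1
          simp only [List.length_drop]
          omega
        · have h4 : (List.drop 10 l).length = 0 := by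
            simp only [List.length_drop]; omega
          rw [h4]
          rw [PySem.List.pyRange_of_pos _ _ (by norm_num : (0:Int) < 10),
              PySem.List.pyRange_of_pos _ _ (by norm_num : (0:Int) < 10)]
          simp
          omega
      rw [hr, ih (l.drop 10).length (by simp [List.length_drop]; omega) (l.drop 10) _ _ rfl]
      have hsl0 : PySem.List.slice l (some 0) (some (0 + 10)) = l.take 10 := by
        rw [PySem.List.slice_toNat l (by norm_num) (by norm_num)]
        have e : ((0:Int) + 10).toNat - ((0:Int)).toNat = 10 := by omega
        have e0 : ((0:Int)).toNat = 0 := rfl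
        rw [e, e0, List.drop_zero]
      rw [hsl0,
          pvChunk10_cons (l.map (fun c => c.1)) (by simp [hne]),
          pvChunk10_cons (l.map (fun c => c.2)) (by simp [hne])]
      simp [List.map_take, List.map_drop]

-- ===== VERDICT (by name: the statement is the Claim_ definition above) =====
theorem process_coordinates_spec : Claim_equal_process_coordinates := by
  intro coordinates _
  unfold Spec_process_coordinates process_coordinates process_coordinates_alt
  simpa using loopA coordinates [] []
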